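-- pv_equiv track=rewrite | github.com/Jonathana1106/PythonITP | Practicas/Practica 5 Intro.py | vaux
-- ===== SOURCE A (Python) =====
-- def vaux(matriz, i, n, rp, rt):
--     if i >= len(matriz):
--         return rt
--     elif n < 0:
--         rt.append(rp)
--         return vaux(matriz, i+1, len(matriz[0])-1, [], rt)
--     else:
--         rp.append(matriz[i][n])
--         return vaux(matriz, i, n-1, rp, rt)
-- ===== SOURCE B (Python) =====
-- def vaux(matriz, i, n, rp, rt):
--     if i >= len(matriz):
--         return rt
--     first = rp + (list(reversed(matriz[i][:n+1])) if n >= 0 else [])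
--     w = len(matriz[0])
--     rest = [list(reversed(matriz[j][:w])) if w > 0 else [] for j in range(i + 1, len(matriz))]
--     rt += [first] + rest
--     return rt
-- ===== Notes on version B (the rewrite author's own statement) =====
-- stated objective: simpler
-- what changed: Replaces A's per-element tail recursion (countdown over n with accumulator lists) by a closed-form build: the first row is a slice-reverse of matriz[i][:n+1] and the remaining rows are produced in one comprehension, with no recursion. Pre_ excludes starting indices i < -len(matriz) (non-standard initial arguments), where A raises IndexError or overflows Python's recursion limit for very negative i.
import Mathlib
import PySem

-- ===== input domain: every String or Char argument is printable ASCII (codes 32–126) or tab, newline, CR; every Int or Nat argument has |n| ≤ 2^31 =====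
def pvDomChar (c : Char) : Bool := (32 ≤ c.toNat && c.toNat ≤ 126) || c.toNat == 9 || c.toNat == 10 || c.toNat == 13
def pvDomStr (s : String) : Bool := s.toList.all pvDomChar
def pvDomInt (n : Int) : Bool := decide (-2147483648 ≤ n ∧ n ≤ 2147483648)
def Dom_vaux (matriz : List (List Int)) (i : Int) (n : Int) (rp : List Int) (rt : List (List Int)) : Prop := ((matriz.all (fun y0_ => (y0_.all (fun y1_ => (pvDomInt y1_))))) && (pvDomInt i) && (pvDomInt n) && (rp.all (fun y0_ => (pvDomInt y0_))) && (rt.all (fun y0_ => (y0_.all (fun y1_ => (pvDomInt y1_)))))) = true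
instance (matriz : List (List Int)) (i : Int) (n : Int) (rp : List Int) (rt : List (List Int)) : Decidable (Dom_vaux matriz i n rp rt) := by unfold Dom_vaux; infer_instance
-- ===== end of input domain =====

-- B replaces A's element-by-element tail recursion by a closed-form build (slice-reverse per
-- row via a comprehension); objective: simpler. Both A and B mutate `rt` in place (Python);
-- A additionally mutates `rp` — the equivalence proved here is about the RETURN value.

-- ===== PORT A =====
def vaux (matriz : List (List Int)) (i : Int) (n : Int) (rp : List Int) (rt : List (List Int)) : List (List Int) :=
  if (matriz.length : Int) ≤ i then rt
  else if n < 0 then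
    match PySem.List.pyGet? matriz 0 with
    | some r0 => vaux matriz (i+1) ((r0.length : Int) - 1) [] (rt ++ [rp])
    | none => rt    -- Python raises IndexError here (matriz empty); excluded by Pre_vaux
  else
    match PySem.List.pyGet? matriz i with
    | some ri =>
      match PySem.List.pyGet? ri n with
      | some x => vaux matriz i (n-1) (rp ++ [x]) rt
      | none => rt  -- Python raises IndexError here; excluded by Pre_vaux
    | none => rt    -- Python raises IndexError here; excluded by Pre_vaux
termination_by (((matriz.length : Int) - i).toNat, (n+1).toNat)
decreasing_by
  · apply Prod.Lex.left; omega
  · apply Prod.Lex.right' <;> omega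

-- ===== PORT B =====
def vaux_alt (matriz : List (List Int)) (i : Int) (n : Int) (rp : List Int) (rt : List (List Int)) : List (List Int) :=
  if (matriz.length : Int) ≤ i then rt
  else
    let first := rp ++ (if 0 ≤ n then (PySem.List.slice ((PySem.List.pyGet? matriz i).getD []) none (some (n+1))).reverse else [])
    let w : Int := matriz.headI.length
    let rest := (PySem.List.pyRange (i+1) matriz.length 1).map
      (fun j => if 0 < w then (PySem.List.slice ((PySem.List.pyGet? matriz j).getD []) none (some w)).reverse else [])
    rt ++ [first] ++ rest

-- ===== PRECONDITION & SPEC =====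
-- rowFits m j k: python row m[j] exists and index k is below its length
def rowFits (m : List (List Int)) (j k : Int) : Bool :=
  match PySem.List.pyGet? m j with
  | some r => decide (k < (r.length : Int))
  | none => false

-- Pre_vaux excludes starting indices i < -len(matriz) (reachable only by non-standard initial
-- arguments): there A either raises IndexError or, when the first row is empty, makes one
-- recursive call per index from i up to len(matriz), overflowing Python's recursion limit for
-- very negative i. Inside that bound Pre_vaux admits exactly the inputs on which A returns:
-- i past the end, or the matrix nonempty, index n fitting in row matriz[i], and every later
-- row able to hold the countdown restarted at len(matriz[0])-1.
-- (the range start is clamped with max only so the condition evaluates fast; with -len ≤ i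
-- the clamp is the identity)
def Pre_vaux (matriz : List (List Int)) (i : Int) (n : Int) (rp : List Int) (rt : List (List Int)) : Prop :=
  (matriz.length : Int) ≤ i ∨
  (-(matriz.length : Int) ≤ i ∧ 0 < matriz.length ∧
   (n < 0 ∨ rowFits matriz i n = true) ∧
   (∀ j ∈ PySem.List.pyRange (max (i+1) (-(matriz.length : Int))) matriz.length 1,
      matriz.headI.length = 0 ∨ rowFits matriz j ((matriz.headI.length : Int) - 1) = true))
instance (matriz : List (List Int)) (i : Int) (n : Int) (rp : List Int) (rt : List (List Int)) : Decidable (Pre_vaux matriz i n rp rt) := by unfold Pre_vaux; infer_instance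

def pvWitness_vaux : List (List Int) × Int × Int × List Int × List (List Int) := ([[1,2],[3,4]], 0, 1, [], [])

def Spec_vaux (matriz : List (List Int)) (i : Int) (n : Int) (rp : List Int) (rt : List (List Int)) (out : List (List Int)) : Prop := out = vaux_alt matriz i n rp rt
instance (matriz : List (List Int)) (i : Int) (n : Int) (rp : List Int) (rt : List (List Int)) (out : List (List Int)) : Decidable (Spec_vaux matriz i n rp rt out) := by unfold Spec_vaux; infer_instance

-- ===== CLAIM (what is proved, stated in full; the proofs are below) =====
def Claim_equal_vaux : Prop := ∀ (matriz : List (List Int)) (i : Int) (n : Int) (rp : List Int) (rt : List (List Int)), Dom_vaux matriz i n rp rt → Pre_vaux matriz i n rp rt → Spec_vaux matriz i n rp rt (vaux matriz i n rp rt)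

-- ===== LEMMAS AND PROOFS =====

theorem pyRange_one_nil (a b : Int) (h : b ≤ a) : PySem.List.pyRange a b 1 = [] := by
  rw [PySem.List.pyRange_one]
  have : (b - a).toNat = 0 := by omega
  simp [this]

-- B's branch for a fresh row countdown absorbs one recursive step of the n<0 branch
theorem alt_step_newrow (matriz : List (List Int)) (i : Int) (n : Int) (rp : List Int) (rt : List (List Int)) (h : ¬ (matriz.length : Int) ≤ i) (hn : n < 0) :
    vaux_alt matriz (i+1) ((matriz.headI.length : Int) - 1) [] (rt ++ [rp]) = vaux_alt matriz i n rp rt := by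
  unfold vaux_alt
  rw [if_neg h, if_neg (by omega : ¬ 0 ≤ n)]
  by_cases h2 : (matriz.length : Int) ≤ i + 1
  · rw [if_pos h2, pyRange_one_nil _ _ h2]
    simp
  · rw [if_neg h2]
    rw [PySem.List.pyRange_one_cons (by omega : i + 1 < (matriz.length : Int))]
    simp only [List.map_cons]
    have harith : (matriz.headI.length : Int) - 1 + 1 = (matriz.headI.length : Int) := by omega
    rw [harith]
    by_cases hw : (0:Int) < (matriz.headI.length : Int)
    · rw [if_pos hw, if_pos (by omega : (0:Int) ≤ (matriz.headI.length : Int) - 1)]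
      simp
    · rw [if_neg hw, if_neg (by omega : ¬ (0:Int) ≤ (matriz.headI.length : Int) - 1)]
      simp

-- B's slice-reverse absorbs one element step of A's countdown within a row
theorem alt_step_elem (matriz : List (List Int)) (i : Int) (n : Int) (rp : List Int) (rt : List (List Int)) (ri : List Int) (x : Int)
    (h : ¬ (matriz.length : Int) ≤ i) (hn : 0 ≤ n)
    (hri : PySem.List.pyGet? matriz i = some ri) (hx : PySem.List.pyGet? ri n = some x) :
    vaux_alt matriz i (n-1) (rp ++ [x]) rt = vaux_alt matriz i n rp rt := by
  have hlt : n.toNat < ri.length := by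
    by_contra hc
    rw [PySem.List.pyGet?_of_nonneg ri hn] at hx
    simp [List.getElem?_eq_none (by omega : ri.length ≤ n.toNat)] at hx
  have hxv : ri[n.toNat] = x := by
    rw [PySem.List.pyGet?_of_nonneg ri hn] at hx
    simpa [List.getElem?_eq_getElem hlt] using hx
  unfold vaux_alt
  rw [if_neg h, if_neg h, hri]
  simp only [Option.getD_some]
  have hs1 : PySem.List.slice ri none (some (n+1)) = ri.take (n.toNat + 1) := by
    rw [PySem.List.slice_to ri (by omega : (0:Int) ≤ n + 1)]
    congr 1; omega
  rw [hs1, List.take_add_one, List.getElem?_eq_getElem hlt, hxv]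
  by_cases h0 : 0 ≤ n - 1
  · rw [if_pos h0, if_pos hn, PySem.List.slice_to ri (by omega : (0:Int) ≤ n - 1 + 1)]
    have : (n - 1 + 1).toNat = n.toNat := by omega
    rw [this]
    simp
  · rw [if_neg h0, if_pos hn]
    have hn0 : n.toNat = 0 := by omega
    simp [hn0]


theorem vaux_eq_alt (matriz : List (List Int)) (i : Int) (n : Int) (rp : List Int) (rt : List (List Int)) (hp : Pre_vaux matriz i n rp rt) : vaux matriz i n rp rt = vaux_alt matriz i n rp rt := by
  revert hp
  fun_induction vaux matriz i n rp rt with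
  | case1 i n rp rt h => intro hp; simp [vaux_alt, h]
  | case2 i n rp rt h hn r0 hr0 ih =>
    intro hp
    rcases hp with hp | ⟨hIL, hL, _, hall⟩
    · exact absurd hp h
    rw [max_eq_left (by omega : -(matriz.length : Int) ≤ i + 1)] at hall
    have hr0' : r0 = matriz.headI := by
      rw [PySem.List.pyGet?_zero] at hr0
      cases matriz with
      | nil => simp at hL
      | cons a l => simpa using hr0.symm
    have hp2 : Pre_vaux matriz (i+1) ((r0.length : Int) - 1) [] (rt ++ [rp]) := by
      by_cases h2 : (matriz.length : Int) ≤ i + 1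
      · exact Or.inl h2
      · refine Or.inr ⟨by omega, hL, ?_, ?_⟩
        · have := hall (i+1) (by rw [PySem.List.mem_pyRange_one]; omega)
          rcases this with hz | hf
          · left; rw [hr0']; omega
          · right; rw [hr0']; exact hf
        · intro j hj
          rw [max_eq_left (by omega : -(matriz.length : Int) ≤ i + 1 + 1)] at hj
          exact hall j (by rw [PySem.List.mem_pyRange_one] at hj ⊢; omega)
    rw [ih hp2, hr0']
    exact alt_step_newrow matriz i n rp rt h hn
  | case3 i n rp rt h hn hr0 =>
    intro hp
    rcases hp with hp | ⟨_, hL, _, _⟩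
    · exact absurd hp h
    rw [PySem.List.pyGet?_zero] at hr0
    cases matriz with
    | nil => simp at hL
    | cons a l => simp at hr0
  | case4 i n rp rt h hn ri hri x hx ih =>
    intro hp
    have hn' : 0 ≤ n := by omega
    have hfit : rowFits matriz i n = true := by
      rcases hp with hp | ⟨_, _, hf, _⟩
      · exact absurd hp h
      · rcases hf with hf | hf
        · exact absurd hf hn
        · exact hf
    have hlen : n < (ri.length : Int) := by
      unfold rowFits at hfit
      rw [hri] at hfit
      simpa using hfit
    have hp2 : Pre_vaux matriz i (n-1) (rp ++ [x]) rt := by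
      rcases hp with hp | ⟨hIL, hL, _, hall⟩
      · exact absurd hp h
      · refine Or.inr ⟨hIL, hL, ?_, hall⟩
        by_cases h1 : n - 1 < 0
        · exact Or.inl h1
        · right; unfold rowFits; rw [hri]; simp; omega
    rw [ih hp2]
    exact alt_step_elem matriz i n rp rt ri x h hn' hri hx
  | case5 i n rp rt h hn ri hri hx =>
    intro hp
    have hfit : rowFits matriz i n = true := by
      rcases hp with hp | ⟨_, _, hf, _⟩
      · exact absurd hp h
      · rcases hf with hf | hf
        · exact absurd hf hn
        · exact hf
    unfold rowFits at hfit
    rw [hri] at hfit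
    have hlen : n < (ri.length : Int) := by simpa using hfit
    rw [PySem.List.pyGet?_of_nonneg ri (by omega : 0 ≤ n),
        List.getElem?_eq_getElem (by omega : n.toNat < ri.length)] at hx
    simp at hx
  | case6 i n rp rt h hn hri =>
    intro hp
    have hfit : rowFits matriz i n = true := by
      rcases hp with hp | ⟨_, _, hf, _⟩
      · exact absurd hp h
      · rcases hf with hf | hf
        · exact absurd hf hn
        · exact hf
    unfold rowFits at hfit
    rw [hri] at hfit
    simp at hfit

-- ===== VERDICT (by name: the statement is the Claim_ definition above) =====
theorem vaux_spec : Claim_equal_vaux := by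
  intro m i n rp rt _ hp
  exact vaux_eq_alt m i n rp rt hp
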